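-- pv_equiv track=rewrite | github.com/tdocog/JaneStreetPuzzleFeb26 | solver.py | all_transforms
-- ===== SOURCE A (Python) =====
-- Cell = tuple[int, int]
--
-- def normalize(points) -> tuple[Cell, ...]:
--     pts = list(points)
--     min_r = min(r for r, _ in pts)
--     min_c = min(c for _, c in pts)
--     return tuple(sorted((r - min_r, c - min_c) for r, c in pts))
--
-- def all_transforms(points) -> list[tuple[Cell, ...]]:
--     pts = list(points)
--     transformed = set()
--     fns = (
--         lambda r, c: (r, c),
--         lambda r, c: (r, -c),
--         lambda r, c: (-r, c),
--         lambda r, c: (-r, -c),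
--         lambda r, c: (c, r),
--         lambda r, c: (c, -r),
--         lambda r, c: (-c, r),
--         lambda r, c: (-c, -r),
--     )
--     for fn in fns:
--         transformed.add(normalize(fn(r, c) for r, c in pts))
--     return sorted(transformed)
-- ===== SOURCE B (Python) =====
-- Cell = tuple[int, int]
--
-- def normalize(points) -> tuple[Cell, ...]:
--     pts = list(points)
--     min_r = min(r for r, _ in pts)
--     min_c = min(c for _, c in pts)
--     return tuple(sorted((r - min_r, c - min_c) for r, c in pts))
--
-- def rotate90(pts):
--     return [(c, -r) for r, c in pts]
--
-- def reflect(pts):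
--     return [(r, -c) for r, c in pts]
--
-- def all_transforms(points) -> list[tuple[Cell, ...]]:
--     # Compose the dihedral group iteratively: keep a running 'current' point
--     # list; each of 4 iterations records current and its reflection (after
--     # normalization), then rotates current by 90 degrees.
--     transformed = set()
--     current = list(points)
--     for _ in range(4):
--         transformed.add(normalize(current))
--         transformed.add(normalize(reflect(current)))
--         current = rotate90(current)
--     return sorted(transformed)
-- ===== Notes on version B (the rewrite author's own statement) =====
-- stated objective: alternative
-- what changed: B replaces the explicit table of eight closed-form symmetry maps by iterative composition: a running point list is rotated 90 degrees four times, and each iteration contributes the normalized list and its normalized reflection to the set.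
import Mathlib
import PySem

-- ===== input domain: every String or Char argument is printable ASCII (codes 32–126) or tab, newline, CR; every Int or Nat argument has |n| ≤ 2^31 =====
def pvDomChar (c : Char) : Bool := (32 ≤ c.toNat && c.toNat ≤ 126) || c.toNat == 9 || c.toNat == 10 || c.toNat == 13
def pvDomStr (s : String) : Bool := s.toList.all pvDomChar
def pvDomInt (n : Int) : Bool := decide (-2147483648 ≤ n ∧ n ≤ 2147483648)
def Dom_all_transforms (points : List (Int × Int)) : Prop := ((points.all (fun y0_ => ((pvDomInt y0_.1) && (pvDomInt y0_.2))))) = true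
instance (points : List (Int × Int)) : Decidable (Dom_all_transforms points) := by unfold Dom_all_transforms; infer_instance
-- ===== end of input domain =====

-- B composes the dihedral group iteratively (rotate-90 loop + reflection) instead of listing eight closed-form maps; alternative decomposition, same cost.


-- ===== PORT A =====
-- normalize, shared helper of both Pythons. Python's min(...) raises ValueError on an
-- empty list; Pre_ excludes empty input, so the '.getD 0' default is never reached.
-- Python compares (Int,Int) tuples lexicographically; the 'toLex' key makes Lean's
-- sort use exactly that order (Mathlib's plain '<' on pairs is the pointwise order).
def pvNormalize (pts : List (Int × Int)) : List (Int × Int) :=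
  let min_r := ((PySem.List.min? (pts.map (fun p => p.1)) (fun x => x)).getD 0)
  let min_c := ((PySem.List.min? (pts.map (fun p => p.2)) (fun x => x)).getD 0)
  PySem.List.sorted (pts.map (fun p => (p.1 - min_r, p.2 - min_c))) (fun p => (toLex p : Lex (Int × Int))) false

-- sorted(transformed): Python compares tuples-of-pairs lexicographically; the key
-- maps each list into the matching Lean lexicographic order.
def pvSortedTuples (ts : List (List (Int × Int))) : List (List (Int × Int)) :=
  @PySem.List.sorted _ _ List.instLinearOrder.toLT LinearOrder.toDecidableLT ts (fun t => t.map (fun p => (toLex p : Lex (Int × Int)))) false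

def all_transforms (points : List (Int × Int)) : List (List (Int × Int)) :=
  let pts := points
  let fns : List ((Int × Int) → (Int × Int)) :=
    [fun p => (p.1, p.2), fun p => (p.1, -p.2), fun p => (-p.1, p.2), fun p => (-p.1, -p.2),
     fun p => (p.2, p.1), fun p => (p.2, -p.1), fun p => (-p.2, p.1), fun p => (-p.2, -p.1)]
  let transformed : PySem.Set (List (Int × Int)) :=
    fns.foldl (fun s fn => PySem.Set.add s (pvNormalize (pts.map fn))) PySem.Set.empty
  pvSortedTuples transformed

-- ===== PORT B =====
def pvRotate90 (pts : List (Int × Int)) : List (Int × Int) := pts.map (fun p => (p.2, -p.1))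

def pvReflect (pts : List (Int × Int)) : List (Int × Int) := pts.map (fun p => (p.1, -p.2))

def all_transforms_alt (points : List (Int × Int)) : List (List (Int × Int)) :=
  let st := (PySem.List.pyRange 0 4 1).foldl
    (fun (st : PySem.Set (List (Int × Int)) × List (Int × Int)) _ =>
      (PySem.Set.add (PySem.Set.add st.1 (pvNormalize st.2)) (pvNormalize (pvReflect st.2)),
       pvRotate90 st.2))
    (PySem.Set.empty, points)
  pvSortedTuples st.1

-- ===== PRECONDITION & SPEC =====
-- Pre_ excludes only the empty list, on which Python's min() raises ValueError (both A and B raise there).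
def Pre_all_transforms (points : List (Int × Int)) : Prop := points ≠ []
instance (points : List (Int × Int)) : Decidable (Pre_all_transforms points) := by unfold Pre_all_transforms; infer_instance
def pvWitness_all_transforms : (List (Int × Int)) := [(0, 1), (1, 0)]
def Spec_all_transforms (points : List (Int × Int)) (out : List (List (Int × Int))) : Prop := out = all_transforms_alt points
instance (points : List (Int × Int)) (out : List (List (Int × Int))) : Decidable (Spec_all_transforms points out) := by unfold Spec_all_transforms; infer_instance

-- ===== CLAIM (what is proved, stated in full; the proofs are below) =====
def Claim_equal_all_transforms : Prop := ∀ (points : List (Int × Int)), Dom_all_transforms points → Pre_all_transforms points → Spec_all_transforms points (all_transforms points)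

-- ===== LEMMAS AND PROOFS =====

-- Two Sets (nodup lists) with the same members sort identically under the injective tuple key.
theorem pvSortedTuples_eq_of_same_mem (s t : List (List (Int × Int)))
    (hs : s.Nodup) (ht : t.Nodup) (h : ∀ x, x ∈ s ↔ x ∈ t) :
    pvSortedTuples s = pvSortedTuples t := by
  unfold pvSortedTuples
  exact PySem.List.sorted_eq_sorted_of_perm s t
    (fun t => t.map (fun p => (toLex p : Lex (Int × Int))))
    (List.map_injective_iff.mpr (fun a b hab => hab))
    ((List.perm_ext_iff_of_nodup hs ht).mpr h)

set_option maxHeartbeats 1000000 in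
theorem all_transforms_spec' (points : List (Int × Int)) :
    all_transforms points = all_transforms_alt points := by
  unfold all_transforms all_transforms_alt
  have hr : PySem.List.pyRange 0 4 1 = [0, 1, 2, 3] := by decide
  rw [hr]
  simp only [List.foldl]
  refine pvSortedTuples_eq_of_same_mem _ _ ?_ ?_ ?_
  · repeat' apply PySem.Set.nodup_add
    exact List.nodup_nil
  · repeat' apply PySem.Set.nodup_add
    exact List.nodup_nil
  · intro x
    simp only [PySem.Set.mem_add, pvRotate90, pvReflect, List.map_map, List.not_mem_nil,
      Function.comp_def, neg_neg, PySem.Set.empty, Prod.mk.eta, List.map_id']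
    tauto

-- ===== VERDICT (by name: the statement is the Claim_ definition above) =====
theorem all_transforms_spec : Claim_equal_all_transforms := by
  intro points _ _
  exact all_transforms_spec' points
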